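-- pv_equiv track=rewrite | github.com/ehzawad/middleware | actions/actions.py | parse_cities_from_message
-- ===== SOURCE A (Python) =====
-- from typing import Text, List, Any, Dict, Optional
-- from typing import Any, Text, Dict, List
--
-- VALID_CITIES = ["Dhaka", "New York", "London", "Tokyo", "Dubai", "Mumbai", "Paris", "Khulna", "Rajshahi"]
--
-- def parse_cities_from_message(message: Text) -> List[Text]:
--     """Find all valid cities mentioned in the user message in order."""
--     msg_lower = message.lower()
--     mentioned = []
--     for city in VALID_CITIES:
--         if city.lower() in msg_lower:
--             mentioned.append(city)
--     # Sort by first occurrence in the message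
--     mentioned = sorted(mentioned, key=lambda c: msg_lower.index(c.lower()))
--     return mentioned
-- ===== SOURCE B (Python) =====
-- VALID_CITIES = ["Dhaka", "New York", "London", "Tokyo", "Dubai", "Mumbai", "Paris", "Khulna", "Rajshahi"]
--
-- def parse_cities_from_message(message):
--     """Single left-to-right scan: append each city the first time it matches."""
--     msg_lower = message.lower()
--     seen = set()
--     result = []
--     for i in range(len(msg_lower)):
--         for city in VALID_CITIES:
--             if city not in seen and msg_lower.startswith(city.lower(), i):
--                 seen.add(city)
--                 result.append(city)
--     return result
-- ===== Notes on version B (the rewrite author's own statement) =====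
-- stated objective: alternative
-- what changed: Replaces A's filter-then-sort-by-first-index with a single left-to-right scan of the lowercased message that appends each city the first time it matches at some position, so first-occurrence order emerges without any sort.
import Mathlib
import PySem

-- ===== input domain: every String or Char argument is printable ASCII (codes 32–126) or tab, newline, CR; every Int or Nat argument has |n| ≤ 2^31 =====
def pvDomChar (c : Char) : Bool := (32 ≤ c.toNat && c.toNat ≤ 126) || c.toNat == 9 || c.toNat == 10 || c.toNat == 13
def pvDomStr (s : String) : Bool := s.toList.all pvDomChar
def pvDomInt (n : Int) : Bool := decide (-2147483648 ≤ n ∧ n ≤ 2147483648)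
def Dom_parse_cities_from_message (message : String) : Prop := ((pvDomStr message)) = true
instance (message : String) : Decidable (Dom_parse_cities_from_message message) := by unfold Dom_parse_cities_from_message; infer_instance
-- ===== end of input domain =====

-- B replaces A's filter-then-sort with one left-to-right scan (first-occurrence order emerges); same results, similar cost.

def VALID_CITIES : List String :=
  ["Dhaka", "New York", "London", "Tokyo", "Dubai", "Mumbai", "Paris", "Khulna", "Rajshahi"]

-- ===== PORT A =====
-- `msg_lower.index(c.lower())` is ported as PySem.Str.find: every sorted element `c`
-- satisfies `c.lower() in msg_lower`, so Python's index never raises and equals find.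
def parse_cities_from_message (message : String) : List String :=
  let msg_lower := PySem.Str.lower message
  let mentioned := VALID_CITIES.foldl
    (fun acc city => if PySem.Str.isIn (PySem.Str.lower city) msg_lower then acc ++ [city] else acc) []
  PySem.List.sorted mentioned (fun c => PySem.Str.find msg_lower (PySem.Str.lower c))

-- ===== PORT B =====
-- `msg_lower.startswith(city.lower(), i)` (0 ≤ i ≤ len) is exactly
-- `PySem.Chars.startswith (L.drop i) (city.lower().toList)`; PySem.startswith has no offset form.
def parse_cities_from_message_alt (message : String) : List String :=
  let L := (PySem.Str.lower message).toList
  let final := (List.range L.length).foldl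
    (fun st i => VALID_CITIES.foldl
      (fun st city =>
        if ¬ PySem.Set.contains st.1 city ∧
            PySem.Chars.startswith (L.drop i) ((PySem.Str.lower city).toList) then
          (PySem.Set.add st.1 city, st.2 ++ [city])
        else st) st)
    (PySem.Set.empty, [])
  final.2

-- ===== PRECONDITION & SPEC =====
def Spec_parse_cities_from_message (message : String) (out : List String) : Prop := out = parse_cities_from_message_alt message
instance (message : String) (out : List String) : Decidable (Spec_parse_cities_from_message message out) := by unfold Spec_parse_cities_from_message; infer_instance

-- ===== CLAIM (what is proved, stated in full; the proofs are below) =====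
def Claim_equal_parse_cities_from_message : Prop := ∀ (message : String), Dom_parse_cities_from_message message → Spec_parse_cities_from_message message (parse_cities_from_message message)

-- ===== LEMMAS AND PROOFS =====

-- lowercased character list of a city
def pvLC (c : String) : List Char := (PySem.Str.lower c).toList

-- first-occurrence key of a city in the lowercased message
def pvKey (L : List Char) (c : String) : Int := PySem.Chars.find L (pvLC c)

-- the scan's output after the first m positions: per-position blocks, in order
def pvR (L : List Char) (m : Nat) : List String :=
  (List.range m).flatMap (fun i : Nat => VALID_CITIES.filter (fun c => pvKey L c = ((i : Nat) : Int)))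

theorem pv_find_spec (L sub : List Char) (h : 0 ≤ PySem.Chars.find L sub) :
    sub <+: L.drop (PySem.Chars.find L sub).toNat ∧
      ∀ j < (PySem.Chars.find L sub).toNat, ¬ sub <+: L.drop j := by
  have h0 : PySem.Chars.findFrom L sub 0 = PySem.Chars.find L sub := PySem.Chars.findFrom_zero L sub
  have hne : PySem.Chars.findFrom L sub ((0:Nat):Int) ≠ -1 := by
    push_cast; rw [h0]; omega
  have := PySem.Chars.findFrom_natCast_spec L sub 0 (Nat.zero_le _) hne
  push_cast at this; rw [h0] at this
  exact ⟨this.2.1, fun j hj => this.2.2 j (Nat.zero_le _) hj⟩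

theorem pv_prefix_key (L : List Char) (c : String) (i : Nat) (h : pvLC c <+: L.drop i) :
    0 ≤ pvKey L c ∧ pvKey L c ≤ (i : Int) := by
  have hin : PySem.Chars.isIn (pvLC c) L = true :=
    (PySem.Chars.exists_prefix_drop_iff_isIn _ _).mp ⟨i, h⟩
  have h0 : 0 ≤ pvKey L c := (PySem.Chars.find_nonneg_iff L (pvLC c)).mpr
    ((PySem.Chars.isIn_iff_infix _ _).mp hin)
  refine ⟨h0, ?_⟩
  have hs := pv_find_spec L (pvLC c) h0
  by_contra hlt
  exact hs.2 i (by unfold pvKey at *; omega) h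

theorem pv_cond (L : List Char) (i : Nat) (c : String) (s : List String)
    (hs : c ∈ s ↔ (0 ≤ pvKey L c ∧ pvKey L c < (i : Int))) :
    ((¬ PySem.Set.contains s c ∧
        PySem.Chars.startswith (L.drop i) ((PySem.Str.lower c).toList)) ↔ pvKey L c = (i : Int)) := by
  have hcm : PySem.Set.contains s c = true ↔ c ∈ s := by
    simp [PySem.Set.contains]
  have hsw : PySem.Chars.startswith (L.drop i) ((PySem.Str.lower c).toList) = true ↔
      pvLC c <+: L.drop i := PySem.Chars.startswith_iff _ _
  constructor
  · rintro ⟨hns, hpre⟩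
    have hp := hsw.mp hpre
    have hk := pv_prefix_key L c i hp
    have : ¬ (0 ≤ pvKey L c ∧ pvKey L c < (i : Int)) := fun h => hns (hcm.mpr (hs.mpr h))
    omega
  · intro hk
    have h0 : 0 ≤ pvKey L c := by omega
    have hsp := pv_find_spec L (pvLC c) h0
    have htn : (pvKey L c).toNat = i := by omega
    refine ⟨fun hcon => ?_, hsw.mpr ?_⟩
    · have := hs.mp (hcm.mp hcon); omega
    · rw [← htn]; exact hsp.1

theorem pv_inner (L : List Char) (i : Nat) :
    ∀ (l : List String) (s r : List String), l.Nodup →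
      (∀ c ∈ l, (c ∈ s ↔ (0 ≤ pvKey L c ∧ pvKey L c < (i : Int)))) →
      l.foldl (fun st city =>
        if ¬ PySem.Set.contains st.1 city ∧
            PySem.Chars.startswith (L.drop i) ((PySem.Str.lower city).toList) then
          (PySem.Set.add st.1 city, st.2 ++ [city])
        else st) (s, r)
      = (s ++ l.filter (fun c => pvKey L c = (i : Int)),
         r ++ l.filter (fun c => pvKey L c = (i : Int))) := by
  intro l
  induction l with
  | nil => intro s r _ _; simp
  | cons c l ih =>
    intro s r hnd hH
    have hndl := (List.nodup_cons.mp hnd).2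
    have hcl : c ∉ l := (List.nodup_cons.mp hnd).1
    have hc := pv_cond L i c s (hH c (List.mem_cons_self ..))
    simp only [List.foldl_cons, List.filter_cons]
    by_cases hk : pvKey L c = (i : Int)
    · rw [if_pos (hc.mpr hk)]
      have hcns : c ∉ s := fun hin => by have := (hH c (List.mem_cons_self ..)).mp hin; omega
      have hadd : PySem.Set.add s c = s ++ [c] := by
        simp [PySem.Set.add, PySem.Set.contains, hcns]
      rw [hadd]
      rw [ih (s ++ [c]) (r ++ [c]) hndl ?_]
      · simp [hk]
      · intro c' hc'
        have hne : c' ≠ c := fun he => hcl (he ▸ hc')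
        simp only [List.mem_append, List.mem_singleton, hne, or_false]
        exact hH c' (List.mem_cons_of_mem _ hc')
    · rw [if_neg (fun h => hk (hc.mp h))]
      rw [ih s r hndl (fun c' hc' => hH c' (List.mem_cons_of_mem _ hc'))]
      simp [hk]

theorem pv_cities_nodup : VALID_CITIES.Nodup := by decide
theorem pv_cities_nonempty : ∀ c ∈ VALID_CITIES, pvLC c ≠ [] := by decide
theorem pv_no_prefix : ∀ c ∈ VALID_CITIES, ∀ c' ∈ VALID_CITIES, c ≠ c' → ¬ (pvLC c <+: pvLC c') := by decide

theorem pv_mem_R (L : List Char) (m : Nat) (c : String) :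
    c ∈ pvR L m ↔ (c ∈ VALID_CITIES ∧ 0 ≤ pvKey L c ∧ pvKey L c < (m : Int)) := by
  unfold pvR
  simp only [List.mem_flatMap, List.mem_range, List.mem_filter, decide_eq_true_eq]
  constructor
  · rintro ⟨i, him, hmem, hk⟩; exact ⟨hmem, by omega⟩
  · rintro ⟨hmem, h0, hm⟩
    exact ⟨(pvKey L c).toNat, by omega, hmem, by omega⟩

theorem pv_outer (L : List Char) (m : Nat) :
    (List.range m).foldl
      (fun st i => VALID_CITIES.foldl
        (fun st city =>
          if ¬ PySem.Set.contains st.1 city ∧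
              PySem.Chars.startswith (L.drop i) ((PySem.Str.lower city).toList) then
            (PySem.Set.add st.1 city, st.2 ++ [city])
          else st) st)
      (PySem.Set.empty, [])
    = (pvR L m, pvR L m) := by
  induction m with
  | zero => simp [pvR, PySem.Set.empty]
  | succ m ih =>
    rw [List.range_succ, List.foldl_append, ih, List.foldl_cons, List.foldl_nil]
    rw [pv_inner L m VALID_CITIES (pvR L m) (pvR L m) pv_cities_nodup
      (fun c hc => by rw [pv_mem_R]; simp [hc])]
    unfold pvR
    rw [List.range_succ, List.flatMap_append]
    simp

theorem pv_no_tie (L : List Char) (i : Int) :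
    ∀ c ∈ VALID_CITIES, ∀ c' ∈ VALID_CITIES, c ≠ c' →
      ¬ (pvKey L c = i ∧ pvKey L c' = i ∧ 0 ≤ i) := by
  rintro c hc c' hc' hne ⟨h1, h2, h0⟩
  have hp1 := (pv_find_spec L (pvLC c) (by unfold pvKey at *; omega)).1
  have hp2 := (pv_find_spec L (pvLC c') (by unfold pvKey at *; omega)).1
  unfold pvKey at h1 h2
  rw [h1] at hp1; rw [h2] at hp2
  rcases List.prefix_or_prefix_of_prefix hp1 hp2 with h | h
  · exact pv_no_prefix c hc c' hc' hne h
  · exact pv_no_prefix c' hc' c hc (Ne.symm hne) h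

theorem pv_block_pairwise (L : List Char) (i : Nat) :
    (VALID_CITIES.filter (fun c => pvKey L c = (i : Int))).Pairwise
      (fun a b => pvKey L a < pvKey L b) := by
  have hnd : (VALID_CITIES.filter (fun c => pvKey L c = (i : Int))).Nodup :=
    pv_cities_nodup.filter _
  refine hnd.imp_of_mem ?_
  intro a b ha hb hne
  exfalso
  simp only [List.mem_filter, decide_eq_true_eq] at ha hb
  exact pv_no_tie L i a ha.1 b hb.1 hne ⟨ha.2, hb.2, by omega⟩

theorem pv_R_pairwise (L : List Char) (m : Nat) :
    (pvR L m).Pairwise (fun a b => pvKey L a < pvKey L b) := by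
  induction m with
  | zero => simp [pvR]
  | succ m ih =>
    unfold pvR
    rw [List.range_succ, List.flatMap_append]
    rw [List.pairwise_append]
    refine ⟨ih, by simpa using pv_block_pairwise L m, ?_⟩
    intro a ha b hb
    have ha' : a ∈ pvR L m := ha
    rw [pv_mem_R] at ha'
    simp only [List.flatMap_cons, List.flatMap_nil, List.append_nil, List.mem_filter,
      decide_eq_true_eq] at hb
    have := ha'.2
    omega

theorem pv_R_nodup (L : List Char) (m : Nat) : (pvR L m).Nodup :=
  ((pv_R_pairwise L m).imp fun h => by rintro rfl; omega)

theorem pv_R_perm (L : List Char) :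
    (pvR L L.length).Perm (VALID_CITIES.filter (fun c => PySem.Chars.isIn (pvLC c) L)) := by
  rw [List.perm_ext_iff_of_nodup (pv_R_nodup L _) (pv_cities_nodup.filter _)]
  intro c
  rw [pv_mem_R, List.mem_filter]
  constructor
  · rintro ⟨hc, h0, hm⟩
    refine ⟨hc, ?_⟩
    have := (pv_find_spec L (pvLC c) h0).1
    exact (PySem.Chars.exists_prefix_drop_iff_isIn _ _).mp ⟨_, this⟩
  · rintro ⟨hc, hin⟩
    have h0 : 0 ≤ pvKey L c := (PySem.Chars.find_nonneg_iff L (pvLC c)).mpr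
      ((PySem.Chars.isIn_iff_infix _ _).mp hin)
    refine ⟨hc, h0, ?_⟩
    have hp := (pv_find_spec L (pvLC c) h0).1
    have hne := pv_cities_nonempty c hc
    have hlen : (pvKey L c).toNat < L.length := by
      by_contra hge
      have hnil : L.drop (PySem.Chars.find L (pvLC c)).toNat = [] :=
        List.drop_eq_nil_of_le (by unfold pvKey at hge; omega)
      rw [hnil] at hp
      exact hne (List.prefix_nil.mp hp)
    have hle := PySem.Chars.find_le_length L (pvLC c)
    unfold pvKey at *
    omega

theorem pv_main (message : String) :
    parse_cities_from_message message = parse_cities_from_message_alt message := by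
  simp only [parse_cities_from_message, parse_cities_from_message_alt]
  rw [pv_outer ((PySem.Str.lower message).toList)]
  have hM : VALID_CITIES.foldl
      (fun acc city => if PySem.Str.isIn (PySem.Str.lower city) (PySem.Str.lower message) then acc ++ [city] else acc) [] =
      VALID_CITIES.filter (fun c => PySem.Chars.isIn (pvLC c) ((PySem.Str.lower message).toList)) := by
    have := PySem.List.foldl_append_if
      (fun city => PySem.Str.isIn (PySem.Str.lower city) (PySem.Str.lower message)) (fun x => x)
      VALID_CITIES []
    simp only [List.nil_append, List.map_id'] at this
    rw [this]
    apply List.filter_congr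
    intro c _
    rw [PySem.Str.isIn_eq]
    rfl
  rw [hM]
  refine PySem.List.sorted_eq_of_perm_of_pairwise_lt
    (VALID_CITIES.filter (fun c => PySem.Chars.isIn (pvLC c) ((PySem.Str.lower message).toList)))
    (pvR ((PySem.Str.lower message).toList) ((PySem.Str.lower message).toList).length)
    (fun c => PySem.Str.find (PySem.Str.lower message) (PySem.Str.lower c))
    (pv_R_perm _) ?_
  exact (pv_R_pairwise _ _).imp
    (fun h => by simpa only [PySem.Str.find_eq, pvKey, pvLC] using h)

-- ===== VERDICT (by name: the statement is the Claim_ definition above) =====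
theorem parse_cities_from_message_spec : Claim_equal_parse_cities_from_message := by
  intro message _
  exact pv_main message
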